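-- pv_equiv track=rewrite | github.com/minsuh99/PNU_DS_CodingTestStudy | 2주차/문제5/기능개발_홍성문.py | solution
-- ===== SOURCE A (Python) =====
-- def solution(progresses, speeds):
--     workday = []
--     answer = []
--
--     for i in range(len(progresses)):
--         remain = 100 - progresses[i] #걸리는 작업 일수 계산
--         day = remain // speeds[i]
--
--         if remain % speeds[i] !=0: #나머지있으면 +1
--             day +=1
--         workday.append(day)
--
--     count = 0
--
--     for j in workday:
--         if j <= workday[0]:
--             count +=1
--         else:
--             answer.append(count)
--             count =1 # 초과하면 무조건 1개로 새로 시작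
--             workday[0] = j #배포기준일 새로 지정
--
--     answer.append(count)
--
--
--     return answer
-- ===== SOURCE B (Python) =====
-- def solution(progresses, speeds):
--     # ceil days per feature, running-max anchor list, then run-length encode the anchors
--     days = [-(-(100 - p) // s) for p, s in zip(progresses, speeds)]
--     anchors = []
--     for d in days:
--         anchors.append(anchors[-1] if anchors and anchors[-1] > d else d)
--     answer = []
--     for prev, cur in zip([None] + anchors, anchors):
--         if cur == prev:
--             answer[-1] += 1
--         else:
--             answer.append(1)
--     return answer
-- ===== Notes on version B (the rewrite author's own statement) =====
-- stated objective: alternative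
-- what changed: A does one counting scan that tracks the current batch deadline by overwriting workday[0] in place; B computes ceil days with negated floor division, materialises the running-maximum anchor list, and run-length encodes it into batch sizes.
-- intended difference: On empty progresses A's unconditional trailing append returns [0]; B returns [], the intended answer since no features means no deployment batches. — e.g. on solution([], []): A returns [0], B returns []
import Mathlib
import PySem

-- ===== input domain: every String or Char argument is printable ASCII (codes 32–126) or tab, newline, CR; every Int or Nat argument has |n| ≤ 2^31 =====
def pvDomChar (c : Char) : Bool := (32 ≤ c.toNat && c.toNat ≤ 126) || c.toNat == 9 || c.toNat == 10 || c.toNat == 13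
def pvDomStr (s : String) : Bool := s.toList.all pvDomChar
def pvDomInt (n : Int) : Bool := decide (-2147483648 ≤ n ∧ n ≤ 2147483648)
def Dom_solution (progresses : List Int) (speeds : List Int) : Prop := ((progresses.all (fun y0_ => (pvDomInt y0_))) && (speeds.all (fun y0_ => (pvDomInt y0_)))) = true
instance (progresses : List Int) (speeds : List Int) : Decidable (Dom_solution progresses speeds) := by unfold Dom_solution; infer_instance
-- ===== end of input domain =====

-- B replaces A's single counting scan (with its in-place workday[0] sentinel) by a
-- running-max anchor list that is then run-length encoded; same cost, alternative shape.

-- ===== PORT A =====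
-- Python's second loop iterates over the live list but only ever mutates index 0,
-- which is consumed first, so the iterated j's are the original elements; the
-- mutated list is threaded through the fold state exactly as A keeps it.
def solution (progresses : List Int) (speeds : List Int) : List Int :=
  let workday := (PySem.List.pyRange 0 (progresses.length : Int) 1).foldl
    (fun wd i =>
      let remain := 100 - PySem.List.pyGetD progresses i 0
      let day := PySem.Int.floordiv remain (PySem.List.pyGetD speeds i 0)
      let day := if PySem.Int.mod remain (PySem.List.pyGetD speeds i 0) ≠ 0 then day + 1 else day
      wd ++ [day]) []
  let st := workday.foldl
    (fun (st : List Int × Int × List Int) j =>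
      if j ≤ PySem.List.pyGetD st.1 0 0 then (st.1, st.2.1 + 1, st.2.2)
      else (PySem.List.pySetD st.1 0 j, 1, st.2.2 ++ [st.2.1]))
    (workday, 0, ([] : List Int))
  st.2.2 ++ [st.2.1]

-- ===== PORT B =====
def solution_alt (progresses : List Int) (speeds : List Int) : List Int :=
  let days := (progresses.zip speeds).map (fun ps => -(PySem.Int.floordiv (-(100 - ps.1)) ps.2))
  let anchors := days.foldl
    (fun acc d =>
      acc ++ [if acc ≠ [] ∧ PySem.List.pyGetD acc (-1) 0 > d then PySem.List.pyGetD acc (-1) 0 else d])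
    ([] : List Int)
  (((List.cons (none : Option Int) (anchors.map some)).zip anchors).foldl
    (fun ans pc =>
      if (some pc.2 == pc.1) then ans.dropLast ++ [PySem.List.pyGetD ans (-1) 0 + 1]
      else ans ++ [1]) ([] : List Int))

-- ===== PRECONDITION & SPEC =====
-- Pre_ excludes exactly the inputs where A raises: an index past speeds' end
-- (IndexError) or a zero speed used by the loop (ZeroDivisionError).
def Pre_solution (progresses : List Int) (speeds : List Int) : Prop :=
  progresses.length ≤ speeds.length ∧ ∀ x ∈ speeds.take progresses.length, x ≠ 0
instance (progresses : List Int) (speeds : List Int) : Decidable (Pre_solution progresses speeds) := by unfold Pre_solution; infer_instance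
def pvWitness_solution : List Int × List Int := ([30, 55, 95], [30, 5, 1])

-- On empty progresses A's unconditional trailing append returns [0]; B returns [],
-- the intended answer: no features means no deployment batches.
def D_solution (progresses : List Int) (_speeds : List Int) : Prop := progresses = []
instance (progresses : List Int) (speeds : List Int) : Decidable (D_solution progresses speeds) := by unfold D_solution; infer_instance

def Spec_solution (progresses : List Int) (speeds : List Int) (out : List Int) : Prop :=
  ¬ D_solution progresses speeds → out = solution_alt progresses speeds
instance (progresses : List Int) (speeds : List Int) (out : List Int) : Decidable (Spec_solution progresses speeds out) := by unfold Spec_solution; infer_instance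

def pvDiffWitness_solution : List Int × List Int := ([], [])
def pvDiffWitnessOut_solution : (List Int) × (List Int) := ([0], [])

-- ===== CLAIM (what is proved, stated in full; the proofs are below) =====
def Claim_unchanged_solution : Prop := ∀ (progresses : List Int) (speeds : List Int), Dom_solution progresses speeds → Pre_solution progresses speeds → Spec_solution progresses speeds (solution progresses speeds)
def Claim_changed_solution : Prop := Dom_solution (pvDiffWitness_solution.1) (pvDiffWitness_solution.2) ∧ Pre_solution (pvDiffWitness_solution.1) (pvDiffWitness_solution.2) ∧ D_solution (pvDiffWitness_solution.1) (pvDiffWitness_solution.2) ∧ solution (pvDiffWitness_solution.1) (pvDiffWitness_solution.2) = pvDiffWitnessOut_solution.1 ∧ solution_alt (pvDiffWitness_solution.1) (pvDiffWitness_solution.2) = pvDiffWitnessOut_solution.2 ∧ pvDiffWitnessOut_solution.1 ≠ pvDiffWitnessOut_solution.2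
def Claim_exact_solution : Prop := ∀ (progresses : List Int) (speeds : List Int), Dom_solution progresses speeds → Pre_solution progresses speeds → D_solution progresses speeds → solution progresses speeds ≠ solution_alt progresses speeds

-- ===== LEMMAS AND PROOFS =====

theorem pv_ceil_div_pos (r s : Int) (hs : 0 < s) :
    -(PySem.Int.floordiv (-r) s) =
      (if PySem.Int.mod r s ≠ 0 then PySem.Int.floordiv r s + 1 else PySem.Int.floordiv r s) := by
  have hq : PySem.Int.floordiv r s * s + PySem.Int.mod r s = r := PySem.Int.floordiv_mul_add_mod r s
  have hm0 := PySem.Int.mod_nonneg r hs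
  have hm1 := PySem.Int.mod_lt r hs
  by_cases h : PySem.Int.mod r s = 0
  · simp only [h, ne_eq, not_true_eq_false, if_false]
    rw [PySem.Int.neg_floordiv_neg_eq_iff_of_pos hs]
    constructor <;> (ring_nf; nlinarith)
  · have hmp : 0 < PySem.Int.mod r s := hm0.lt_of_ne (Ne.symm h)
    simp only [h, ne_eq, not_false_eq_true, if_true]
    rw [PySem.Int.neg_floordiv_neg_eq_iff_of_pos hs]
    constructor <;> (ring_nf; nlinarith)

theorem pv_ceil_div (r s : Int) (hs : s ≠ 0) :
    -(PySem.Int.floordiv (-r) s) =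
      (if PySem.Int.mod r s ≠ 0 then PySem.Int.floordiv r s + 1 else PySem.Int.floordiv r s) := by
  rcases lt_or_gt_of_ne hs with hneg | hpos
  · have h1 : PySem.Int.floordiv (-r) s = PySem.Int.floordiv r (-s) := by
      have h := PySem.Int.floordiv_neg_neg r (-s); rwa [neg_neg] at h
    have h2 : PySem.Int.floordiv r s = PySem.Int.floordiv (-r) (-s) := by
      have h := PySem.Int.floordiv_neg_neg (-r) (-s); rwa [neg_neg, neg_neg] at h
    have h3 : PySem.Int.mod r s = -PySem.Int.mod (-r) (-s) := by
      have h := PySem.Int.mod_neg_neg (-r) (-s); rwa [neg_neg, neg_neg] at h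
    rw [h1, h2, h3]
    have := pv_ceil_div_pos (-r) (-s) (by omega)
    simp only [neg_neg] at this
    rw [this]
    by_cases h : PySem.Int.mod (-r) (-s) = 0 <;> simp [h]
  · exact pv_ceil_div_pos r s hpos

def pvGrp : List Int → Int → Int → List Int → List Int
  | [], _, c, acc => acc ++ [c]
  | j :: t, a, c, acc => if j ≤ a then pvGrp t a (c + 1) acc else pvGrp t j 1 (acc ++ [c])

def pvScan : Int → List Int → List Int
  | _, [] => []
  | a, j :: t => (if a > j then a else j) :: pvScan (if a > j then a else j) t

theorem pv_A_inv (t : List Int) : ∀ (wd : List Int) (c : Int) (acc : List Int), wd ≠ [] →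
    ((t.foldl (fun (st : List Int × Int × List Int) j =>
        if j ≤ PySem.List.pyGetD st.1 0 0 then (st.1, st.2.1 + 1, st.2.2)
        else (PySem.List.pySetD st.1 0 j, 1, st.2.2 ++ [st.2.1])) (wd, c, acc)).2.2
     ++ [(t.foldl (fun (st : List Int × Int × List Int) j =>
        if j ≤ PySem.List.pyGetD st.1 0 0 then (st.1, st.2.1 + 1, st.2.2)
        else (PySem.List.pySetD st.1 0 j, 1, st.2.2 ++ [st.2.1])) (wd, c, acc)).2.1])
    = pvGrp t (wd.getD 0 0) c acc := by
  induction t with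
  | nil => intro wd c acc _; simp [pvGrp]
  | cons j t ih =>
    intro wd c acc h
    obtain ⟨x, xs, rfl⟩ := List.exists_cons_of_ne_nil h
    have hg : PySem.List.pyGetD (x :: xs) 0 0 = x := by
      rw [PySem.List.pyGetD_zero]; rfl
    simp only [List.foldl_cons]
    rw [hg]
    by_cases hle : j ≤ x
    · rw [if_pos hle, ih (x :: xs) (c + 1) acc (by simp)]
      simp [pvGrp, hle]
    · rw [if_neg hle]
      have hset : PySem.List.pySetD (x :: xs) 0 j = j :: xs := by
        rw [PySem.List.pySetD_of_nonneg _ _ (by norm_num)]; simp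
      rw [hset, ih (j :: xs) 1 (acc ++ [c]) (by simp)]
      simp [pvGrp, hle]

theorem pv_anch (t : List Int) : ∀ (acc : List Int) (a : Int),
    t.foldl (fun acc d =>
        acc ++ [if acc ≠ [] ∧ PySem.List.pyGetD acc (-1) 0 > d then PySem.List.pyGetD acc (-1) 0 else d])
      (acc ++ [a])
    = (acc ++ [a]) ++ pvScan a t := by
  induction t with
  | nil => intro acc a; simp [pvScan]
  | cons d t ih =>
    intro acc a
    simp only [List.foldl_cons, ne_eq, List.append_eq_nil_iff, List.cons_ne_nil, and_false,
      not_false_eq_true, true_and, PySem.List.pyGetD_neg_one_append_singleton]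
    rw [ih (acc ++ [a]) (if a > d then a else d)]
    simp [pvScan]

theorem pv_B_inv (t : List Int) : ∀ (a c : Int) (acc : List Int),
    ((((a :: pvScan a t).map some).zip (pvScan a t)).foldl
      (fun ans (pc : Option Int × Int) =>
        if (some pc.2 == pc.1) then ans.dropLast ++ [PySem.List.pyGetD ans (-1) 0 + 1]
        else ans ++ [1]) (acc ++ [c]))
    = pvGrp t a c acc := by
  induction t with
  | nil => intro a c acc; simp [pvScan, pvGrp]
  | cons j t ih =>
    intro a c acc
    by_cases hle : j ≤ a
    · have ha' : (if a > j then a else j) = a := by split <;> omega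
      simp only [pvScan, ha', List.map_cons, List.zip_cons_cons, List.foldl_cons,
        beq_self_eq_true, if_pos, List.dropLast_concat,
        PySem.List.pyGetD_neg_one_append_singleton]
      have h2 := ih a (c + 1) acc
      simp only [List.map_cons] at h2
      rw [h2]
      simp [pvGrp, hle]
    · have ha' : (if a > j then a else j) = j := by split <;> omega
      have hne : (some j == some a) = false := by
        simp; omega
      simp only [pvScan, ha', List.map_cons, List.zip_cons_cons, List.foldl_cons, hne,
        if_false, Bool.false_eq_true]
      have h2 := ih j 1 (acc ++ [c])
      simp only [List.map_cons] at h2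
      rw [h2]
      simp [pvGrp, hle]

theorem pv_days (p s : List Int) (hlen : p.length ≤ s.length)
    (hz : ∀ x ∈ s.take p.length, x ≠ 0) :
    ((PySem.List.pyRange 0 (p.length : Int) 1).foldl (fun wd i =>
       wd ++ [if PySem.Int.mod (100 - PySem.List.pyGetD p i 0) (PySem.List.pyGetD s i 0) ≠ 0
              then PySem.Int.floordiv (100 - PySem.List.pyGetD p i 0) (PySem.List.pyGetD s i 0) + 1
              else PySem.Int.floordiv (100 - PySem.List.pyGetD p i 0) (PySem.List.pyGetD s i 0)]) [])
    = (p.zip s).map (fun ps => -(PySem.Int.floordiv (-(100 - ps.1)) ps.2)) := by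
  rw [PySem.List.foldl_append_singleton_eq_map, PySem.List.pyRange_one]
  simp only [List.map_map, List.nil_append, sub_zero, Int.toNat_natCast]
  apply List.ext_getElem
  · simp [List.length_zip]; omega
  · intro k hk1 hk2
    simp only [List.getElem_map, List.getElem_range, Function.comp_apply, List.getElem_zip]
    have hkp : k < p.length := by simpa using hk1
    have hks : k < s.length := by omega
    have hgp : PySem.List.pyGetD p ((0 : Int) + (k : Int)) 0 = p[k] := by
      rw [zero_add, PySem.List.pyGetD_natCast, List.getD_eq_getElem _ _ hkp]
    have hgs : PySem.List.pyGetD s ((0 : Int) + (k : Int)) 0 = s[k] := by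
      rw [zero_add, PySem.List.pyGetD_natCast, List.getD_eq_getElem _ _ hks]
    rw [hgp, hgs]
    have hs0 : s[k] ≠ 0 := by
      apply hz
      rw [List.mem_iff_getElem]
      exact ⟨k, by simp; omega, by simp [List.getElem_take]⟩
    exact (pv_ceil_div (100 - p[k]) s[k] hs0).symm

theorem pv_main (p s : List Int) (hp : p ≠ []) (hlen : p.length ≤ s.length)
    (hz : ∀ x ∈ s.take p.length, x ≠ 0) : solution p s = solution_alt p s := by
  have hdays := pv_days p s hlen hz
  obtain ⟨d, ds, hds⟩ : ∃ d ds,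
      (p.zip s).map (fun ps => -(PySem.Int.floordiv (-(100 - ps.1)) ps.2)) = d :: ds := by
    have hlz : (p.zip s).length = p.length := by rw [List.length_zip]; omega
    cases hpz : p.zip s with
    | nil =>
      exfalso
      rw [hpz] at hlz
      exact hp (List.length_eq_zero_iff.mp hlz.symm)
    | cons x xs => exact ⟨_, _, by rw [List.map_cons]⟩
  simp only [solution, solution_alt]
  rw [hdays, hds]
  -- A side
  have hg : PySem.List.pyGetD (d :: ds) 0 0 = d := by rw [PySem.List.pyGetD_zero]; rfl
  simp only [List.foldl_cons]
  rw [hg, if_pos (le_refl d)]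
  simp only [zero_add]
  rw [pv_A_inv ds (d :: ds) 1 [] (by simp)]
  -- B side: anchors
  have hanch : ds.foldl (fun acc d' =>
      acc ++ [if acc ≠ [] ∧ PySem.List.pyGetD acc (-1) 0 > d' then PySem.List.pyGetD acc (-1) 0 else d']) [d]
      = d :: pvScan d ds := by
    have := pv_anch ds [] d
    simpa using this
  simp only [ne_eq, not_true_eq_false, false_and, if_false, List.nil_append]
  rw [hanch]
  -- B side: run-length encode
  have h2 := pv_B_inv ds d 1 []
  simp only [List.map_cons, List.nil_append] at h2 ⊢
  simp only [List.zip_cons_cons, List.foldl_cons]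
  rw [show (some d == (none : Option Int)) = false from rfl]
  simp only [Bool.false_eq_true, if_false, List.nil_append]
  rw [h2]
  rfl

theorem solution_spec : Claim_unchanged_solution := by
  intro p s _ hpre
  unfold Spec_solution
  intro hnd
  unfold D_solution at hnd
  unfold Pre_solution at hpre
  exact pv_main p s hnd hpre.1 hpre.2

theorem solution_changed : Claim_changed_solution := by
  unfold Claim_changed_solution; decide

theorem solution_tight : Claim_exact_solution := by
  intro p s _ _ hd
  unfold D_solution at hd
  subst hd
  have hA : solution [] s = [0] := rfl
  have hB : solution_alt [] s = [] := rfl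
  rw [hA, hB]
  simp
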